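-- pv_equiv track=rewrite | github.com/arlene725/csci150 | selenium/courseScraper.py | days_to_robot_language
-- ===== SOURCE A (Python) =====
-- def days_to_robot_language(days_str):
--     days_array = []
--     while days_str:
--         days_array.append(days_str[:2])
--         days_str = days_str[2:]
--
--     robo_days = list('00000')
--     if "Mo" in days_array:
--         robo_days[0] = "1"
--     if "Tu" in days_array:
--         robo_days[1] = "1"
--     if "We" in days_array:
--         robo_days[2] = "1"
--     if "Th" in days_array:
--         robo_days[3] = "1"
--     if "Fr" in days_array:
--         robo_days[4] = "1"
--
--     return "".join(robo_days)
-- ===== SOURCE B (Python) =====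
-- def days_to_robot_language(days_str):
--     DAYS = "MoTuWeThFr"
--     mask = 0
--     while days_str:
--         chunk, days_str = days_str[:2], days_str[2:]
--         j = DAYS.find(chunk)
--         if len(chunk) == 2 and j >= 0 and j % 2 == 0:
--             mask |= 1 << (j // 2)
--     return "".join("1" if mask >> k & 1 else "0" for k in range(5))
-- ===== Notes on version B (the rewrite author's own statement) =====
-- stated objective: alternative
-- what changed: B accumulates an integer bitmask in one pass (each aligned 2-char chunk is located by string search in the concatenated day table 'MoTuWeThFr', an even hit setting bit index//2) and synthesises the output string from the mask's five bits, instead of A's chunk list, five membership scans and a mutable character list.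
import Mathlib
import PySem

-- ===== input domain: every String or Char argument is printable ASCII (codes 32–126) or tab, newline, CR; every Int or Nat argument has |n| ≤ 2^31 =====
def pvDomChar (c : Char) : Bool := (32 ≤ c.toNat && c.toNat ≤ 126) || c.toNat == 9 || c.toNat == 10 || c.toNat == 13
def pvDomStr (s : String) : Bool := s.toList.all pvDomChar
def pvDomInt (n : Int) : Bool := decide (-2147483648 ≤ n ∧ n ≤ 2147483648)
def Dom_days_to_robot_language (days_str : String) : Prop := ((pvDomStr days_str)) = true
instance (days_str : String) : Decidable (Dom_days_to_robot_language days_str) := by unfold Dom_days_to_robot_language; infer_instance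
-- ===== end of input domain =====

-- B accumulates one integer bitmask over the aligned 2-char chunks (locating each
-- chunk by string search in the day table "MoTuWeThFr") and builds the output from
-- the mask's five bits, instead of A's chunk list, five membership scans and a
-- mutable character list (same return value; objective: alternative algorithm).

-- ===== PORT A =====
-- A's while loop: peel off days_str[:2] and continue on days_str[2:].
def pvChunksA : List Char → List String
  | [] => []
  | [c] => [String.ofList [c]]
  | c1 :: c2 :: rest => String.ofList [c1, c2] :: pvChunksA rest

def days_to_robot_language (days_str : String) : String :=
  let days_array := pvChunksA days_str.toList
  let robo_days : List String := ["0", "0", "0", "0", "0"]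
  let r1 := if days_array.contains "Mo" then robo_days.set 0 "1" else robo_days
  let r2 := if days_array.contains "Tu" then r1.set 1 "1" else r1
  let r3 := if days_array.contains "We" then r2.set 2 "1" else r2
  let r4 := if days_array.contains "Th" then r3.set 3 "1" else r3
  let r5 := if days_array.contains "Fr" then r4.set 4 "1" else r4
  String.join r5

-- ===== PORT B =====
-- B's day table DAYS = "MoTuWeThFr"
def pvDays : List Char := "MoTuWeThFr".toList

-- B's loop body: j = DAYS.find(chunk); if len(chunk)==2 and j>=0 and j%2==0: mask |= 1 << (j//2)
def pvStepB (mask : Nat) (chunk : List Char) : Nat :=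
  let j := PySem.Chars.find pvDays chunk
  if chunk.length = 2 ∧ 0 ≤ j ∧ PySem.Int.mod j 2 = 0 then mask ||| (1 <<< (j.toNat / 2)) else mask

-- B's while loop: consume two chars at a time, updating the mask.
def pvLoopB : List Char → Nat → Nat
  | [], m => m
  | [c], m => pvStepB m [c]
  | c1 :: c2 :: rest, m => pvLoopB rest (pvStepB m [c1, c2])

-- B's final join over range(5) of the mask's bits.
def days_to_robot_language_alt (days_str : String) : String :=
  let mask := pvLoopB days_str.toList 0
  String.join ((PySem.List.pyRange 0 5 1).map (fun k => if mask >>> k.toNat &&& 1 = 1 then "1" else "0"))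

-- ===== PRECONDITION & SPEC =====
def Spec_days_to_robot_language (days_str : String) (out : String) : Prop := out = days_to_robot_language_alt days_str
instance (days_str : String) (out : String) : Decidable (Spec_days_to_robot_language days_str out) := by unfold Spec_days_to_robot_language; infer_instance

-- ===== CLAIM (what is proved, stated in full; the proofs are below) =====
def Claim_equal_days_to_robot_language : Prop := ∀ (days_str : String), Dom_days_to_robot_language days_str → Spec_days_to_robot_language days_str (days_to_robot_language days_str)

-- ===== LEMMAS AND PROOFS =====

-- B's step phrased on the chunk as a string
def pvStepS (m : Nat) (s : String) : Nat := pvStepB m s.toList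

-- B's loop is the fold of its step over A's chunk list.
theorem pvLoopB_eq_foldl (l : List Char) (m : Nat) :
    pvLoopB l m = (pvChunksA l).foldl pvStepS m := by
  induction l using pvChunksA.induct generalizing m with
  | case1 => rfl
  | case2 c => simp [pvLoopB, pvChunksA, pvStepS]
  | case3 c1 c2 rest ih => simp [pvLoopB, pvChunksA, pvStepS, ih]

theorem pvOrAbsorb (a x : Nat) : a ||| (a ||| x) = a ||| x := by
  rw [← Nat.or_assoc, Nat.or_self]

-- B's step on each of the five day chunks sets the corresponding bit
theorem pvStep_Mo (m : Nat) : pvStepS m "Mo" = m ||| 1 := by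
  have h : PySem.Chars.find pvDays ['M','o'] = 0 := by decide
  simp [pvStepS, pvStepB, h]
theorem pvStep_Tu (m : Nat) : pvStepS m "Tu" = m ||| 2 := by
  have h : PySem.Chars.find pvDays ['T','u'] = 2 := by decide
  simp [pvStepS, pvStepB, h]
theorem pvStep_We (m : Nat) : pvStepS m "We" = m ||| 4 := by
  have h : PySem.Chars.find pvDays ['W','e'] = 4 := by decide
  simp [pvStepS, pvStepB, h]
theorem pvStep_Th (m : Nat) : pvStepS m "Th" = m ||| 8 := by
  have h : PySem.Chars.find pvDays ['T','h'] = 6 := by decide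
  simp [pvStepS, pvStepB, h]
theorem pvStep_Fr (m : Nat) : pvStepS m "Fr" = m ||| 16 := by
  have h : PySem.Chars.find pvDays ['F','r'] = 8 := by decide
  simp [pvStepS, pvStepB, h]

-- a chunk that is none of the five days leaves the mask unchanged: an even-index
-- hit in "MoTuWeThFr" for a 2-char chunk forces the chunk to be one of the days
theorem pvStep_other (m : Nat) (s : String)
    (h1 : s ≠ "Mo") (h2 : s ≠ "Tu") (h3 : s ≠ "We") (h4 : s ≠ "Th") (h5 : s ≠ "Fr") :
    pvStepS m s = m := by
  unfold pvStepS pvStepB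
  dsimp only
  split_ifs with h
  · exfalso
    obtain ⟨hlen, hj0, hj2⟩ := h
    obtain ⟨c1, c2, hc⟩ := List.length_eq_two.mp hlen
    have hne : PySem.Chars.find pvDays s.toList ≠ -1 := by omega
    have hspec := PySem.Chars.findFrom_natCast_spec pvDays s.toList 0 (by simp) (by
      simpa using hne)
    simp only [Nat.cast_zero, PySem.Chars.findFrom_zero] at hspec
    obtain ⟨-, hpre, -⟩ := hspec
    have hle : PySem.Chars.find pvDays s.toList ≤ (pvDays : List Char).length :=
      PySem.Chars.find_le_length _ _
    have hlen10 : (pvDays : List Char).length = 10 := by decide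
    set j : Int := PySem.Chars.find pvDays s.toList with hj
    have hmod : j % 2 = 0 := by
      rwa [PySem.Int.mod_eq_emod_of_pos (by norm_num)] at hj2
    have hjn : (j.toNat : Int) = j := Int.toNat_of_nonneg hj0
    set n : Nat := j.toNat with hn
    have hub : n ≤ 10 := by omega
    have hev : n % 2 = 0 := by omega
    rw [hc] at hpre
    interval_cases n <;>
      first
        | omega
        | (obtain ⟨e1, e2⟩ : _ ∧ _ := by simpa [pvDays, List.cons_prefix_cons] using hpre
           subst e1; subst e2
           first
             | exact h1 (String.toList_inj.mp (hc.trans (by decide)))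
             | exact h2 (String.toList_inj.mp (hc.trans (by decide)))
             | exact h3 (String.toList_inj.mp (hc.trans (by decide)))
             | exact h4 (String.toList_inj.mp (hc.trans (by decide)))
             | exact h5 (String.toList_inj.mp (hc.trans (by decide))))
        | simp [pvDays] at hpre
  · rfl

-- folding B's step from mask m sets exactly the bits of the days present
theorem pvFold_mask (cs : List String) : ∀ m : Nat,
    cs.foldl pvStepS m =
      m ||| (if cs.contains "Mo" then 1 else 0) ||| (if cs.contains "Tu" then 2 else 0)
        ||| (if cs.contains "We" then 4 else 0) ||| (if cs.contains "Th" then 8 else 0)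
        ||| (if cs.contains "Fr" then 16 else 0) := by
  induction cs with
  | nil => intro m; simp
  | cons s cs ih =>
      intro m
      rw [List.foldl_cons]
      by_cases h1 : s = "Mo"
      · subst h1
        rw [pvStep_Mo, ih]
        by_cases hm : "Mo" ∈ cs <;>
          simp [hm, List.contains_cons, Nat.or_assoc, Nat.or_comm, Nat.or_left_comm, Nat.zero_or, Nat.or_zero, pvOrAbsorb]
      · by_cases h2 : s = "Tu"
        · subst h2
          rw [pvStep_Tu, ih]
          by_cases hm : "Tu" ∈ cs <;>
            simp [hm, List.contains_cons, Nat.or_assoc, Nat.or_comm, Nat.or_left_comm, Nat.zero_or, Nat.or_zero, pvOrAbsorb]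
        · by_cases h3 : s = "We"
          · subst h3
            rw [pvStep_We, ih]
            by_cases hm : "We" ∈ cs <;>
              simp [hm, List.contains_cons, Nat.or_assoc, Nat.or_comm, Nat.or_left_comm, Nat.zero_or, Nat.or_zero, pvOrAbsorb]
          · by_cases h4 : s = "Th"
            · subst h4
              rw [pvStep_Th, ih]
              by_cases hm : "Th" ∈ cs <;>
                simp [hm, List.contains_cons, Nat.or_assoc, Nat.or_comm, Nat.or_left_comm, Nat.zero_or, Nat.or_zero, pvOrAbsorb]
            · by_cases h5 : s = "Fr"
              · subst h5
                rw [pvStep_Fr, ih]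
                by_cases hm : "Fr" ∈ cs <;>
                  simp [hm, List.contains_cons, Nat.or_assoc, Nat.or_comm, Nat.or_left_comm, Nat.zero_or, Nat.or_zero, pvOrAbsorb]
              · rw [pvStep_other m s h1 h2 h3 h4 h5, ih]
                simp [Ne.symm h1, Ne.symm h2, Ne.symm h3, Ne.symm h4, Ne.symm h5]

-- ===== VERDICT (by name: the statement is the Claim_ definition above) =====
theorem days_to_robot_language_spec : Claim_equal_days_to_robot_language := by
  intro s _
  unfold Spec_days_to_robot_language days_to_robot_language_alt
  rw [pvLoopB_eq_foldl, pvFold_mask]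
  simp only [days_to_robot_language]
  split_ifs <;> rfl
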